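-- pv_equiv track=rewrite | github.com/Potterhead007/aether-band-engine | src/aether/knowledge/theory.py | sequence_melody
-- ===== SOURCE A (Python) =====
-- def sequence_melody(
--     melody_midi: list[int],
--     interval: int,
--     iterations: int = 2
-- ) -> list[int]:
--     """
--     Create a melodic sequence by transposing a pattern.
--
--     Common sequences: -2 (descending 2nd), -3 (descending 3rd), +4 (ascending 4th)
--     """
--     result = list(melody_midi)
--     pattern = list(melody_midi)
--
--     for i in range(iterations):
--         pattern = [n + interval for n in pattern]
--         result.extend(pattern)
--
--     return result
-- ===== SOURCE B (Python) =====
-- def sequence_melody(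
--     melody_midi: list[int],
--     interval: int,
--     iterations: int = 2
-- ) -> list[int]:
--     # Closed-form: block k (k = 1..iterations) is the original melody shifted
--     # by k*interval; no running pattern accumulator is kept.
--     return list(melody_midi) + [
--         n + k * interval for k in range(1, iterations + 1) for n in melody_midi
--     ]
-- ===== Notes on version B (the rewrite author's own statement) =====
-- stated objective: simpler
-- what changed: Replaced the running re-transposed pattern accumulator with a single flat comprehension computing each block's offset in closed form as k*interval from the original melody.
import Mathlib
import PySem

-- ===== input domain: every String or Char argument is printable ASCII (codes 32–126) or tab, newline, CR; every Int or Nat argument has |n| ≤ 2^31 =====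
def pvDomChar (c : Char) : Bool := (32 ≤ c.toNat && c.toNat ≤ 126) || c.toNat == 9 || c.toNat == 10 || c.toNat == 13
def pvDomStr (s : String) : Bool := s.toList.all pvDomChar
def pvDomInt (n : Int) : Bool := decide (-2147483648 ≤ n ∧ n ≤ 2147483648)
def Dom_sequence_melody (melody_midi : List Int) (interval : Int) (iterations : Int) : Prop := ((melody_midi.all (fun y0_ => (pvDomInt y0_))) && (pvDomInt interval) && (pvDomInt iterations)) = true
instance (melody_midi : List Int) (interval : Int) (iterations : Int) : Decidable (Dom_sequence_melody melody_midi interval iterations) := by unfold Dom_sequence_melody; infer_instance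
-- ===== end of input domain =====

-- B replaces A's running re-transposed pattern accumulator with a closed-form offset k*interval per block (objective: simpler).

-- ===== PORT A =====
-- result = list(m); pattern = list(m); for i in range(iterations): pattern = [n+interval for n in pattern]; result.extend(pattern)
def sequence_melody (melody_midi : List Int) (interval : Int) (iterations : Int) : List Int :=
  ((PySem.List.pyRange 0 iterations 1).foldl
    (fun (st : List Int × List Int) _ =>
      let pattern := st.2.map (fun n => n + interval)
      (st.1 ++ pattern, pattern))
    (melody_midi, melody_midi)).1

-- ===== PORT B =====
-- list(melody_midi) + [n + k*interval for k in range(1, iterations+1) for n in melody_midi]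
def sequence_melody_alt (melody_midi : List Int) (interval : Int) (iterations : Int) : List Int :=
  melody_midi ++
    (PySem.List.pyRange 1 (iterations + 1) 1).flatMap
      (fun k => melody_midi.map (fun n => n + k * interval))

-- ===== PRECONDITION & SPEC =====
def Spec_sequence_melody (melody_midi : List Int) (interval : Int) (iterations : Int) (out : List Int) : Prop := out = sequence_melody_alt melody_midi interval iterations
instance (melody_midi : List Int) (interval : Int) (iterations : Int) (out : List Int) : Decidable (Spec_sequence_melody melody_midi interval iterations out) := by unfold Spec_sequence_melody; infer_instance

-- ===== CLAIM (what is proved, stated in full; the proofs are below) =====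
def Claim_equal_sequence_melody : Prop := ∀ (melody_midi : List Int) (interval : Int) (iterations : Int), Dom_sequence_melody melody_midi interval iterations → Spec_sequence_melody melody_midi interval iterations (sequence_melody melody_midi interval iterations)

-- ===== LEMMAS AND PROOFS =====

-- Loop invariant for A: folding over any list with pattern = m shifted by c*iv
-- appends the blocks shifted by (c+1)*iv, (c+2)*iv, …
theorem seqmel_loop (m : List Int) (iv : Int) (l : List Int) (acc : List Int) (c : Int) :
    (l.foldl
      (fun (st : List Int × List Int) _ =>
        let pattern := st.2.map (fun n => n + iv)
        (st.1 ++ pattern, pattern))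
      (acc, m.map (fun n => n + c * iv))).1
    = acc ++ (List.range l.length).flatMap
        (fun (i : Nat) => m.map (fun n => n + (c + 1 + (i : Int)) * iv)) := by
  induction l generalizing acc c with
  | nil => simp
  | cons a l ih =>
    have hpat : (m.map (fun n => n + c * iv)).map (fun n => n + iv)
        = m.map (fun n => n + (c + 1) * iv) := by
      simp only [List.map_map]
      apply List.map_congr_left
      intro n _
      simp only [Function.comp]
      ring
    simp only [List.foldl_cons, hpat]
    rw [ih (acc ++ m.map (fun n => n + (c + 1) * iv)) (c + 1)]
    rw [List.length_cons, List.range_succ_eq_map]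
    rw [List.flatMap_cons, List.flatMap_map, List.append_assoc]
    congr 2
    · norm_num
    · apply List.flatMap_congr
      intro i _
      congr 1
      funext n
      push_cast
      ring

theorem sequence_melody_eq_alt (m : List Int) (iv it : Int) :
    sequence_melody m iv it = sequence_melody_alt m iv it := by
  unfold sequence_melody sequence_melody_alt
  conv_lhs =>
    rw [show ((m, m) : List Int × List Int)
          = (m, m.map (fun n => n + (0 : Int) * iv)) from by simp]
  rw [seqmel_loop m iv _ m 0]
  rw [PySem.List.length_pyRange_one, PySem.List.pyRange_one 1 (it + 1), List.flatMap_map]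
  have h : (it + 1 - 1).toNat = (it - 0).toNat := by omega
  rw [h]
  norm_num

-- ===== VERDICT (by name: the statement is the Claim_ definition above) =====
theorem sequence_melody_spec : Claim_equal_sequence_melody := by
  intro m iv it _
  exact (sequence_melody_eq_alt m iv it).symm ▸ rfl
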